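-- pv_equiv track=rewrite | github.com/Wasroy/Projet_FMPAD | question3_differences.py | calculer_differences_ordres_totaux
-- ===== SOURCE A (Python) =====
-- def calculer_differences_ordres_totaux(profil):
--     """
--     profil: liste de n bulletins de votes par ordres totaux : chaque bulletin est une liste de m rangs
--     l'index i du bulletin correspond a la candidate i, la valeur est son rang dans le classement d'appréciation
--
--     RETURN: liste de toutes les valeurs dckcl(p) pour toutes les paires de candidates
--     """
--
--     #petite verif
--     if len(profil)==0 :
--         raise ValueError("erreur aucune votantes")
--
--     if len(profil[0])==0 :
--         raise ValueError("erreur aucune candidates")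
--
--     m = len(profil[0])
--
--     differences = []
--
--     for k in range(m):
--         for l in range(k+1, m):
--
--             #ici la logique change pour compter : une votante prefere k a l si le rang de k est plus petit que le rang de l
--             nb_k_prefere_l = 0
--
--             for ordre in profil:
--
--                 if ordre[k] < ordre[l]:
--
--                     nb_k_prefere_l += 1
--
--             #symétriquement on fait la même chose (on aurait pu je penses aussi faire un if else et ajouter direct dans nb_l_prefere_k)
--             #on aurait gagner un peu de complexité
--             nb_l_prefere_k = 0
--
--             for ordre in profil:
--
--                 if ordre[l] < ordre[k]:
--                     nb_l_prefere_k += 1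
--
--             difference = abs(nb_k_prefere_l - nb_l_prefere_k)
--
--             differences.append(difference)
--
--     return differences
-- ===== SOURCE B (Python) =====
-- def calculer_differences_ordres_totaux(profil):
--     # Same result as A; different organisation: one single pass over the ballots
--     # fills an m x m preference-count matrix, then the output list is read off
--     # the matrix in the same (k, l) pair order.
--     if len(profil) == 0:
--         raise ValueError("erreur aucune votantes")
--     if len(profil[0]) == 0:
--         raise ValueError("erreur aucune candidates")
--     m = len(profil[0])
--     paires = [(k, l) for k in range(m) for l in range(k + 1, m)]
--     cnt = [[0] * m for _ in range(m)]
--     for ordre in profil: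
--         for (k, l) in paires:
--             if ordre[k] < ordre[l]:
--                 cnt[k][l] += 1
--             elif ordre[l] < ordre[k]:
--                 cnt[l][k] += 1
--     return [abs(cnt[k][l] - cnt[l][k]) for (k, l) in paires]
-- ===== Notes on version B (the rewrite author's own statement) =====
-- stated objective: alternative
-- what changed: B swaps the loop nesting: instead of two counting passes over the whole profile for every candidate pair, it makes one pass over the ballots filling an m x m preference-count matrix and then reads the absolute differences off the matrix in the same pair order.
import Mathlib
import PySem

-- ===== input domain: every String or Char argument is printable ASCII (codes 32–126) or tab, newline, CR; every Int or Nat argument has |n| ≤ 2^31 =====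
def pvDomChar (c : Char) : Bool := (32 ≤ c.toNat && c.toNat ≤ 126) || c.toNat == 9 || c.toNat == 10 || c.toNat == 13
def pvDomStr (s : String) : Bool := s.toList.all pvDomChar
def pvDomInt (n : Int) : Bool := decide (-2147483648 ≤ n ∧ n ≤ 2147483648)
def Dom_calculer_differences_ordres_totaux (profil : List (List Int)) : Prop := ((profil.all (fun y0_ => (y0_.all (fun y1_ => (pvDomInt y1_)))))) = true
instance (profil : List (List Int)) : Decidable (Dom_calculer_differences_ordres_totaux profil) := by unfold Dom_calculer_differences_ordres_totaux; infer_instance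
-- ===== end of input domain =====

-- B reorganises the computation: one pass over the ballots fills a preference-count
-- matrix, then the output is read off the matrix in the same pair order (objective: alternative).

-- ordre[k]: exact under Pre_ (every ballot has length ≥ m and indices satisfy 0 ≤ k < m)
def pvGet (o : List Int) (i : Int) : Int := PySem.List.pyGetD o i 0

-- ===== PORT A =====
def calculer_differences_ordres_totaux (profil : List (List Int)) : List Int :=
  if profil.length = 0 then []               -- Python: raise ValueError (excluded by Pre_)
  else if (profil.headI).length = 0 then []  -- Python: raise ValueError (excluded by Pre_)
  else
    let m : Int := (profil.headI).length
    (PySem.List.pyRange 0 m 1).foldl (fun diffs k =>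
      (PySem.List.pyRange (k + 1) m 1).foldl (fun diffs l =>
        let nb_k_prefere_l : Int :=
          profil.foldl (fun n ordre => if pvGet ordre k < pvGet ordre l then n + 1 else n) 0
        let nb_l_prefere_k : Int :=
          profil.foldl (fun n ordre => if pvGet ordre l < pvGet ordre k then n + 1 else n) 0
        diffs ++ [|nb_k_prefere_l - nb_l_prefere_k|]) diffs) []

-- ===== PORT B =====
-- the pair list [(k, l) for k in range(m) for l in range(k+1, m)]
def pvPairs (m : Int) : List (Int × Int) :=
  (PySem.List.pyRange 0 m 1).flatMap (fun k =>
    (PySem.List.pyRange (k + 1) m 1).map (fun l => (k, l)))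

-- cnt[p] += 1 on the count matrix (represented as a total function, 0-initialised: exact
-- for the updates and reads B performs, which all lie inside the m x m index square)
def pvBump (cnt : Int × Int → Int) (p : Int × Int) : Int × Int → Int :=
  fun q => if q = p then cnt p + 1 else cnt q

-- the body of B's inner loop over the pair list, for one ballot `ordre`
def pvStep (ordre : List Int) (cnt : Int × Int → Int) (kl : Int × Int) : Int × Int → Int :=
  if pvGet ordre kl.1 < pvGet ordre kl.2 then pvBump cnt kl
  else if pvGet ordre kl.2 < pvGet ordre kl.1 then pvBump cnt (kl.2, kl.1)
  else cnt

def calculer_differences_ordres_totaux_alt (profil : List (List Int)) : List Int :=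
  if profil.length = 0 then []               -- Python: raise ValueError (excluded by Pre_)
  else if (profil.headI).length = 0 then []  -- Python: raise ValueError (excluded by Pre_)
  else
    let m : Int := (profil.headI).length
    let paires := pvPairs m
    let cnt := profil.foldl (fun cnt ordre => paires.foldl (pvStep ordre) cnt) (fun _ => 0)
    paires.map (fun kl => |cnt kl - cnt (kl.2, kl.1)|)

-- ===== PRECONDITION & SPEC =====
-- Pre_ excludes exactly the inputs where Python A raises: empty profile / empty first
-- ballot (ValueError) and, when there is at least one candidate pair (m ≥ 2), profiles
-- containing a ballot shorter than the first (IndexError; with m = 1 no ballot is indexed).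
def Pre_calculer_differences_ordres_totaux (profil : List (List Int)) : Prop :=
  profil ≠ [] ∧ profil.headI ≠ [] ∧
    (2 ≤ (profil.headI).length → ∀ o ∈ profil, (profil.headI).length ≤ o.length)
instance (profil : List (List Int)) : Decidable (Pre_calculer_differences_ordres_totaux profil) := by unfold Pre_calculer_differences_ordres_totaux; infer_instance

def pvWitness_calculer_differences_ordres_totaux : List (List Int) := [[1, 2, 2], [2, 1, 3], [3, 3, 1]]

def Spec_calculer_differences_ordres_totaux (profil : List (List Int)) (out : List Int) : Prop := out = calculer_differences_ordres_totaux_alt profil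
instance (profil : List (List Int)) (out : List Int) : Decidable (Spec_calculer_differences_ordres_totaux profil out) := by unfold Spec_calculer_differences_ordres_totaux; infer_instance

-- ===== CLAIM (what is proved, stated in full; the proofs are below) =====
def Claim_equal_calculer_differences_ordres_totaux : Prop := ∀ (profil : List (List Int)), Dom_calculer_differences_ordres_totaux profil → Pre_calculer_differences_ordres_totaux profil → Spec_calculer_differences_ordres_totaux profil (calculer_differences_ordres_totaux profil)

-- ===== LEMMAS AND PROOFS =====

lemma pvPairs_mem {m a b : Int} : (a, b) ∈ pvPairs m ↔ 0 ≤ a ∧ a < b ∧ b < m := by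
  simp only [pvPairs, List.mem_flatMap, List.mem_map, PySem.List.mem_pyRange_one, Prod.mk.injEq]
  constructor
  · rintro ⟨k, ⟨hk0, hkm⟩, l, ⟨hl1, hlm⟩, rfl, rfl⟩; omega
  · rintro ⟨h0, hab, hbm⟩; exact ⟨a, ⟨h0, by omega⟩, b, ⟨by omega, hbm⟩, rfl, rfl⟩

lemma pvPairs_fst_lt_snd {m : Int} {p : Int × Int} (hp : p ∈ pvPairs m) : p.1 < p.2 := by
  obtain ⟨k, l⟩ := p
  exact (pvPairs_mem.mp hp).2.1

lemma pvPairs_nodup (m : Int) : (pvPairs m).Nodup := by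
  rw [pvPairs, List.nodup_flatMap]
  refine ⟨fun k _ => (PySem.List.nodup_pyRange_one _ _).map (fun x y h => by simpa using h), ?_⟩
  refine (PySem.List.pairwise_lt_pyRange_one 0 m).imp ?_
  intro k k' hlt p hp hp'
  simp only [List.mem_map] at hp hp'
  obtain ⟨l, _, rfl⟩ := hp
  obtain ⟨l', _, h⟩ := hp'
  exact absurd (congrArg Prod.fst h) (by simp; omega)

-- the unordered pair {a, b} is listed exactly once in pvPairs m
lemma pvPairs_countP {m a b : Int} (hab : (a, b) ∈ pvPairs m) :
    (pvPairs m).countP (fun p => p == (a, b) || p == (b, a)) = 1 := by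
  have hlt : a < b := (pvPairs_mem.mp hab).2.1
  have hcong : (pvPairs m).countP (fun p => p == (a, b) || p == (b, a))
      = (pvPairs m).countP (fun p => p == (a, b)) := by
    refine List.countP_congr (fun p hp => ?_)
    have hp12 := pvPairs_fst_lt_snd hp
    simp only [Bool.or_eq_true, beq_iff_eq]
    constructor
    · rintro (rfl | rfl)
      · rfl
      · simp at hp12; omega
    · intro h; exact Or.inl h
  rw [hcong, ← List.count_eq_countP]
  exact List.count_eq_one_of_mem (pvPairs_nodup m) hab

-- B's inner loop observed at entry (a, b): each listed pair naming {a, b} adds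
-- [ordre[a] < ordre[b]] there; every other pair leaves the entry unchanged
lemma pvStep_fold (ordre : List Int) (L : List (Int × Int)) (a b : Int) (hab : a ≠ b) :
    ∀ cnt : Int × Int → Int,
      (L.foldl (pvStep ordre) cnt) (a, b)
        = cnt (a, b) + (L.countP (fun p => p == (a, b) || p == (b, a)) : Int)
            * (if pvGet ordre a < pvGet ordre b then 1 else 0) := by
  have hne : ((a, b) : Int × Int) ≠ (b, a) := fun h => hab (congrArg Prod.fst h)
  induction L with
  | nil => intro cnt; simp
  | cons p L ih =>
    intro cnt
    rw [List.foldl_cons, ih, List.countP_cons]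
    by_cases h1 : p = (a, b)
    · subst h1
      have hcnt : (pvStep ordre cnt (a, b)) (a, b)
          = cnt (a, b) + (if pvGet ordre a < pvGet ordre b then 1 else 0) := by
        by_cases hlt : pvGet ordre a < pvGet ordre b
        · simp [pvStep, pvBump, hlt]
        · by_cases hgt : pvGet ordre b < pvGet ordre a
          · simp [pvStep, pvBump, hlt, hgt, hne]
          · simp [pvStep, hlt, hgt]
      rw [hcnt]; simp; split_ifs <;> ring
    · by_cases h2 : p = (b, a)
      · subst h2
        have hcnt : (pvStep ordre cnt (b, a)) (a, b)
            = cnt (a, b) + (if pvGet ordre a < pvGet ordre b then 1 else 0) := by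
          by_cases hlt : pvGet ordre b < pvGet ordre a
          · have hnlt : ¬ pvGet ordre a < pvGet ordre b := by omega
            simp [pvStep, pvBump, hlt, hne, hnlt]
          · by_cases hgt : pvGet ordre a < pvGet ordre b
            · simp [pvStep, pvBump, hlt, hgt]
            · simp [pvStep, hlt, hgt]
        rw [hcnt]
        simp; split_ifs <;> ring
      · obtain ⟨k, l⟩ := p
        have ha : ((a, b) : Int × Int) ≠ (k, l) := fun h => h1 h.symm
        have hb : ((a, b) : Int × Int) ≠ (l, k) := by
          intro h; apply h2
          rw [Prod.mk.injEq] at h ⊢; exact ⟨h.2.symm, h.1.symm⟩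
        have hcnt : (pvStep ordre cnt (k, l)) (a, b) = cnt (a, b) := by
          simp only [pvStep]
          split_ifs <;> simp [pvBump, ha, hb]
        rw [hcnt]; simp [h1, h2]

-- A's counting loop is a countP
lemma count_loop (profil : List (List Int)) (a b : Int) :
    profil.foldl (fun n o => if pvGet o a < pvGet o b then n + 1 else n) (0 : Int)
      = (profil.countP (fun o => decide (pvGet o a < pvGet o b)) : Int) := by
  simpa using PySem.List.foldl_ite_add_one (fun o => pvGet o a < pvGet o b) profil (0 : Int)

-- the final matrix entry at (a, b), for (a, b) listed in pvPairs m
lemma cnt_final (profil : List (List Int)) (m a b : Int) (hab : (a, b) ∈ pvPairs m) :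
    ∀ cnt : Int × Int → Int,
      (profil.foldl (fun cnt ordre => (pvPairs m).foldl (pvStep ordre) cnt) cnt) (a, b)
        = cnt (a, b) + (profil.countP (fun o => decide (pvGet o a < pvGet o b)) : Int) := by
  have hne : a ≠ b := by have := (pvPairs_mem.mp hab).2.1; omega
  induction profil with
  | nil => intro cnt; simp
  | cons o profil ih =>
    intro cnt
    rw [List.foldl_cons, ih, pvStep_fold o _ a b hne, pvPairs_countP hab, List.countP_cons]
    by_cases hd : pvGet o a < pvGet o b <;> simp [hd] <;> ring

-- the final matrix entry at the swapped position (b, a)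
lemma cnt_final_swap (profil : List (List Int)) (m a b : Int) (hab : (a, b) ∈ pvPairs m) :
    ∀ cnt : Int × Int → Int,
      (profil.foldl (fun cnt ordre => (pvPairs m).foldl (pvStep ordre) cnt) cnt) (b, a)
        = cnt (b, a) + (profil.countP (fun o => decide (pvGet o b < pvGet o a)) : Int) := by
  have hne : b ≠ a := by have := (pvPairs_mem.mp hab).2.1; omega
  induction profil with
  | nil => intro cnt; simp
  | cons o profil ih =>
    intro cnt
    have hcount : (pvPairs m).countP (fun p => p == (b, a) || p == (a, b)) = 1 := by
      rw [List.countP_congr (q := fun p => p == (a, b) || p == (b, a))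
        (fun p _ => by rw [Bool.or_comm])]
      exact pvPairs_countP hab
    rw [List.foldl_cons, ih, pvStep_fold o _ b a hne, hcount, List.countP_cons]
    by_cases hd : pvGet o b < pvGet o a <;> simp [hd] <;> ring

-- ===== VERDICT (by name: the statement is the Claim_ definition above) =====
theorem calculer_differences_ordres_totaux_spec : Claim_equal_calculer_differences_ordres_totaux := by
  intro profil _ hpre
  obtain ⟨h1, h2, -⟩ := hpre
  have hl1 : ¬ (profil.length = 0) := by simpa [List.length_eq_zero_iff] using h1
  have hl2 : ¬ ((profil.headI).length = 0) := by simpa [List.length_eq_zero_iff] using h2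
  unfold Spec_calculer_differences_ordres_totaux
  simp only [calculer_differences_ordres_totaux, calculer_differences_ordres_totaux_alt,
    if_neg hl1, if_neg hl2]
  set m : Int := ((profil.headI).length : Int) with hm
  -- flatten A's nested append loops into a flatMap over the pair indices
  simp only [PySem.List.foldl_append_singleton_eq_map]
  rw [PySem.List.foldl_append_eq_flatMap, List.nil_append]
  -- put B's map over the pair list into the same flatMap shape
  have hshape : ∀ (F : Int × Int → Int), (pvPairs m).map F
      = (PySem.List.pyRange 0 m 1).flatMap
          (fun k => (PySem.List.pyRange (k + 1) m 1).map (fun l => F (k, l))) := by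
    intro F
    rw [pvPairs, List.map_flatMap]
    simp only [List.map_map]
    rfl
  rw [hshape]
  refine List.flatMap_congr (fun k hk => ?_)
  refine List.map_congr_left (fun l hl => ?_)
  rw [PySem.List.mem_pyRange_one] at hk hl
  have hmem : ((k, l) : Int × Int) ∈ pvPairs m := pvPairs_mem.mpr ⟨hk.1, by omega, hl.2⟩
  rw [count_loop, count_loop,
    cnt_final profil m k l hmem (fun _ => 0),
    cnt_final_swap profil m k l hmem (fun _ => 0)]
  simp
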